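-- pv_equiv track=rewrite | github.com/bu-geon/algorithm | programmers/2022mock_exam/엄강우/5회/p3.py | solution
-- ===== SOURCE A (Python) =====
-- def solution(distance, scope, times):
--     answer = distance
--     for idx in range(len(scope)):
--         start = min(scope[idx])
--         end = max(scope[idx])
--         for i in range(start, end+1):
--             if 0 < i % sum(times[idx]) <= times[idx][0]:
--                 answer = min(answer, i)
--
--     return answer
-- ===== SOURCE B (Python) =====
-- def first_hit(start, end, T, w):
--     """Smallest i in [start, end] with 0 < i % T <= w, in O(1), or None."""
--     if T <= 0:
--         return None          # all residues are <= 0: nothing is detected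
--     m = min(w, T - 1)        # largest usable residue
--     if m < 1:
--         return None          # no residue r with 0 < r <= w exists
--     r = start % T
--     if 1 <= r <= m:
--         i = start
--     elif r == 0:
--         i = start + 1
--     else:                    # r > m: next position with residue 1
--         i = start + (T - r) + 1
--     return i if i <= end else None
--
--
-- def solution(distance, scope, times):
--     answer = distance
--     for sc, tm in zip(scope, times):
--         hit = first_hit(min(sc), max(sc), sum(tm), tm[0] if tm else 0)
--         if hit is not None:
--             answer = min(answer, hit)
--     return answer
-- ===== Notes on version B (the rewrite author's own statement) =====
-- stated objective: faster
-- what changed: B replaces A's inner scan of every integer position in [min(scope_i), max(scope_i)] by an O(1) modular-arithmetic computation of the first position with residue in (0, work] per scope, folding the per-scope minima.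
import Mathlib
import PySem

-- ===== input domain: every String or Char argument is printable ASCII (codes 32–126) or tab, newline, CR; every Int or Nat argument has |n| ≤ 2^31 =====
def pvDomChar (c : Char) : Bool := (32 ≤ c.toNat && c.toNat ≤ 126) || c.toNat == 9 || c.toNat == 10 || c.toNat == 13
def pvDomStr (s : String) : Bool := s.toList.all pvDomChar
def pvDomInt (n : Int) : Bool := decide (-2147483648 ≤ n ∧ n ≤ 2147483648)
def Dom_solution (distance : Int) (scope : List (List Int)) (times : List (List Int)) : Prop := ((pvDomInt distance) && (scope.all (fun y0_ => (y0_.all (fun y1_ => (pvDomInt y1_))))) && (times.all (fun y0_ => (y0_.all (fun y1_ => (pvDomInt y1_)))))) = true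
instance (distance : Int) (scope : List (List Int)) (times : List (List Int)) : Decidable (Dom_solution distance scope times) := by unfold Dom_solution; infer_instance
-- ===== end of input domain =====

-- B replaces A's inner scan of every position in [min(scope_i), max(scope_i)] by an O(1)
-- modular-arithmetic computation of the first detected position per scope (objective: faster).

-- ===== PORT A =====
-- literal transliteration of A: outer loop over indices, inner loop over range(start, end+1)
def solution (distance : Int) (scope : List (List Int)) (times : List (List Int)) : Int :=
  (List.range scope.length).foldl (fun answer idx =>
    let sc := scope.getD idx []
    let tm := times.getD idx []
    let start := (PySem.List.min? sc (fun x => x)).getD 0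
    let stop := (PySem.List.max? sc (fun x => x)).getD 0
    (PySem.List.pyRange start (stop + 1) 1).foldl (fun ans i =>
      if 0 < PySem.Int.mod i tm.sum ∧ PySem.Int.mod i tm.sum ≤ tm.getD 0 0
      then min ans i else ans) answer) distance

-- ===== PORT B =====
-- smallest i in [start, stop] with 0 < i % T ≤ w, computed in O(1); none if no such i
def firstHit (start stop T w : Int) : Option Int :=
  if T ≤ 0 then none
  else
    let m := min w (T - 1)
    if m < 1 then none
    else
      let r := PySem.Int.mod start T
      let i := if 1 ≤ r ∧ r ≤ m then start
               else if r = 0 then start + 1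
               else start + (T - r) + 1
      if i ≤ stop then some i else none

def solution_alt (distance : Int) (scope : List (List Int)) (times : List (List Int)) : Int :=
  (scope.zip times).foldl (fun answer p =>
    match firstHit ((PySem.List.min? p.1 (fun x => x)).getD 0)
                   ((PySem.List.max? p.1 (fun x => x)).getD 0)
                   p.2.sum (p.2.getD 0 0) with
    | some i => min answer i
    | none => answer) distance

-- ===== PRECONDITION & SPEC =====
-- Pre_ excludes exactly the inputs where Python A raises: an index past len(times)
-- (IndexError), an empty scope list (ValueError in min), or sum(times[idx]) = 0
-- (ZeroDivisionError).
def Pre_solution (distance : Int) (scope : List (List Int)) (times : List (List Int)) : Prop :=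
  scope.length ≤ times.length ∧
  ∀ p ∈ scope.zip times, p.1 ≠ [] ∧ p.2.sum ≠ 0

instance (distance : Int) (scope : List (List Int)) (times : List (List Int)) : Decidable (Pre_solution distance scope times) := by unfold Pre_solution; infer_instance

def pvWitness_solution : Int × List (List Int) × List (List Int) :=
  (10, [[1, 6], [3, 5]], [[2, 4], [1, 2]])

def Spec_solution (distance : Int) (scope : List (List Int)) (times : List (List Int)) (out : Int) : Prop := out = solution_alt distance scope times
instance (distance : Int) (scope : List (List Int)) (times : List (List Int)) (out : Int) : Decidable (Spec_solution distance scope times out) := by unfold Spec_solution; infer_instance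

-- ===== CLAIM (what is proved, stated in full; the proofs are below) =====
def Claim_equal_solution : Prop := ∀ (distance : Int) (scope : List (List Int)) (times : List (List Int)), Dom_solution distance scope times → Pre_solution distance scope times → Spec_solution distance scope times (solution distance scope times)

-- ===== LEMMAS AND PROOFS =====

-- folding conditional-min over a list none of whose elements satisfy P leaves the accumulator
theorem foldl_cmin_none (P : Int → Prop) [DecidablePred P] (l : List Int)
    (h : ∀ x ∈ l, ¬ P x) (answer : Int) :
    l.foldl (fun ans i => if P i then min ans i else ans) answer = answer := by
  induction l generalizing answer with
  | nil => rfl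
  | cons a t ih =>
    simp only [List.foldl_cons, if_neg (h a (List.mem_cons_self))]
    exact ih (fun x hx => h x (List.mem_cons_of_mem a hx)) answer

-- folding conditional-min when the accumulator is already ≤ every satisfying element
theorem foldl_cmin_le (P : Int → Prop) [DecidablePred P] (l : List Int) :
    ∀ answer, (∀ x ∈ l, P x → answer ≤ x) →
    l.foldl (fun ans i => if P i then min ans i else ans) answer = answer := by
  induction l with
  | nil => intro answer _; rfl
  | cons a t ih =>
    intro answer h
    simp only [List.foldl_cons]
    by_cases hPa : P a
    · rw [if_pos hPa, min_eq_left (h a List.mem_cons_self hPa)]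
      exact ih answer (fun x hx => h x (List.mem_cons_of_mem a hx))
    · rw [if_neg hPa]
      exact ih answer (fun x hx => h x (List.mem_cons_of_mem a hx))

-- folding conditional-min over a list whose least satisfying element is c gives min answer c
theorem foldl_cmin_least (P : Int → Prop) [DecidablePred P] (l : List Int) :
    ∀ answer (c : Int), c ∈ l → P c → (∀ x ∈ l, P x → c ≤ x) →
    l.foldl (fun ans i => if P i then min ans i else ans) answer = min answer c := by
  induction l with
  | nil => intro _ c hc; exact absurd hc (List.not_mem_nil)
  | cons a t ih =>
    intro answer c hc hPc hleast
    simp only [List.foldl_cons]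
    by_cases hPa : P a
    · rw [if_pos hPa]
      by_cases hct : c ∈ t
      · rw [ih (min answer a) c hct hPc (fun x hx => hleast x (List.mem_cons_of_mem a hx))]
        have hca : c ≤ a := hleast a List.mem_cons_self hPa
        omega
      · have hca : c = a := by
          rcases List.mem_cons.mp hc with h | h
          · exact h
          · exact absurd h hct
        subst hca
        rw [foldl_cmin_le P t (min answer c)
          (fun x hx hPx => le_trans (min_le_right _ _) (hleast x (List.mem_cons_of_mem c hx) hPx))]
    · rw [if_neg hPa]
      have hct : c ∈ t := by
        rcases List.mem_cons.mp hc with h | h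
        · exact absurd (h ▸ hPc) hPa
        · exact h
      exact ih answer c hct hPc (fun x hx => hleast x (List.mem_cons_of_mem a hx))

-- arithmetic: Python's % agrees with emod for a positive divisor, bounds
theorem mod_bounds {T : Int} (hT : 0 < T) (a : Int) :
    0 ≤ PySem.Int.mod a T ∧ PySem.Int.mod a T < T := by
  rw [PySem.Int.mod_eq_emod_of_pos hT]
  exact ⟨Int.emod_nonneg a (by omega), Int.emod_lt_of_pos a hT⟩

-- shifting inside one period: (s + d) % T = s % T + d when s % T + d < T
theorem mod_add_small {T : Int} (hT : 0 < T) (s d : Int) (hd : 0 ≤ d)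
    (h : PySem.Int.mod s T + d < T) :
    PySem.Int.mod (s + d) T = PySem.Int.mod s T + d := by
  simp only [PySem.Int.mod_eq_emod_of_pos hT] at *
  have h0 : 0 ≤ s % T := Int.emod_nonneg s (by omega)
  have key : (s + d) % T = (s % T + d) % T := by
    conv_lhs => rw [← Int.ediv_add_emod s T]
    rw [show T * (s / T) + s % T + d = (s % T + d) + T * (s / T) by ring,
      Int.add_mul_emod_self_left]
  rw [key, Int.emod_eq_of_lt (by omega) h]

theorem mod_add_wrap {T : Int} (hT : 0 < T) (s : Int) :
    PySem.Int.mod (s + (T - PySem.Int.mod s T)) T = 0 := by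
  simp only [PySem.Int.mod_eq_emod_of_pos hT]
  conv_lhs => rw [← Int.ediv_add_emod s T]
  have e1 : (T * (s / T) + s % T) % T = s % T := by
    rw [show T * (s / T) + s % T = s % T + T * (s / T) by ring,
      Int.add_mul_emod_self_left, Int.emod_emod_of_dvd _ (dvd_refl T)]
  rw [e1, show T * (s / T) + s % T + (T - s % T) = T * (s / T + 1) by ring,
    Int.mul_emod_right]

-- the fold of A's inner loop equals B's closed form (for T ≠ 0)
theorem step_eq (s e T w : Int) (hT : T ≠ 0) (answer : Int) :
    (PySem.List.pyRange s (e + 1) 1).foldl (fun ans i =>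
      if 0 < PySem.Int.mod i T ∧ PySem.Int.mod i T ≤ w then min ans i else ans) answer
    = match firstHit s e T w with
      | some i => min answer i
      | none => answer := by
  set P : Int → Prop := fun i => 0 < PySem.Int.mod i T ∧ PySem.Int.mod i T ≤ w with hP
  by_cases hTpos : T ≤ 0
  · -- T < 0: every residue is ≤ 0, nothing satisfies P; firstHit = none
    have hTneg : T < 0 := by omega
    have hnone : ∀ x : Int, ¬ P x := by
      intro x hx
      have : PySem.Int.mod x T ≤ 0 := by
        have h1 : PySem.Int.mod (-(-x)) (-(-T)) = -PySem.Int.mod (-x) (-T) :=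
          PySem.Int.mod_neg_neg (-x) (-T)
        simp only [neg_neg] at h1
        have h2 : 0 ≤ PySem.Int.mod (-x) (-T) := by
          rw [PySem.Int.mod_eq_emod_of_pos (by omega : (0:Int) < -T)]
          exact Int.emod_nonneg _ (by omega)
        omega
      omega
    rw [firstHit, if_pos hTpos, foldl_cmin_none P _ (fun x _ => hnone x)]
  · have hTp : 0 < T := by omega
    rw [firstHit, if_neg hTpos]
    simp only []
    set m := min w (T - 1) with hm
    by_cases hm1 : m < 1
    · -- no usable residue: P never holds
      have hnone : ∀ x : Int, ¬ P x := by
        intro x ⟨h1, h2⟩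
        have := (mod_bounds hTp x).2
        omega
      rw [if_pos hm1, foldl_cmin_none P _ (fun x _ => hnone x)]
    · rw [if_neg hm1]
      set r := PySem.Int.mod s T with hr
      have hrb := mod_bounds hTp s
      have hT2 : 2 ≤ T := by omega
      set c : Int := if 1 ≤ r ∧ r ≤ m then s else if r = 0 then s + 1 else s + (T - r) + 1 with hc
      have hsc : s ≤ c := by
        rw [hc]; split_ifs <;> omega
      have hPc : P c := by
        rw [hc]
        split_ifs with h1 h2
        · exact ⟨by omega, by omega⟩
        · -- c = s + 1, residue 1
          have : PySem.Int.mod (s + 1) T = r + 1 := mod_add_small hTp s 1 (by omega) (by omega)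
          exact ⟨by omega, by omega⟩
        · -- c = s + (T - r) + 1, residue 1
          have hrm : m < r := by omega
          have : PySem.Int.mod (s + (T - r) + 1) T = 1 := by
            have h0 : PySem.Int.mod (s + (T - r)) T = 0 := mod_add_wrap hTp s
            have := mod_add_small hTp (s + (T - r)) 1 (by omega) (by omega)
            omega
          exact ⟨by omega, by omega⟩
      have hbelow : ∀ x : Int, s ≤ x → x < c → ¬ P x := by
        intro x hsx hxc ⟨h1, h2⟩
        rw [hc] at hxc
        split_ifs at hxc with hA hB
        · omega
        · -- c = s + 1, so x = s, residue r = 0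
          have hxs : x = s := by omega
          rw [hxs] at h1; omega
        · -- r > m; x ∈ [s, s + (T - r)]
          have hrm : m < r := by omega
          -- since r ≤ T - 1 always and r > m = min w (T-1), we must have m = w < T - 1
          have hmw : m = w := by omega
          by_cases hlast : x = s + (T - r)
          · rw [hlast] at h1
            rw [mod_add_wrap hTp s] at h1
            omega
          · have hd : x - s < T - r := by omega
            have : PySem.Int.mod x T = r + (x - s) := by
              have := mod_add_small hTp s (x - s) (by omega) (by omega)
              rwa [show s + (x - s) = x by ring] at this
            omega
      by_cases hce : c ≤ e
      · rw [if_pos hce]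
        refine foldl_cmin_least P _ answer c ?_ hPc ?_
        · rw [PySem.List.mem_pyRange_one]; omega
        · intro x hx hPx
          rw [PySem.List.mem_pyRange_one] at hx
          by_contra hlt
          exact hbelow x hx.1 (by omega) hPx
      · rw [if_neg hce]
        refine foldl_cmin_none P _ (fun x hx hPx => ?_) answer
        rw [PySem.List.mem_pyRange_one] at hx
        exact hbelow x hx.1 (by omega) hPx

-- aligning A's index fold over range(len scope) with B's fold over zip scope times
theorem fold_align (g : List Int → List Int → Int → Int) :
    ∀ (scope times : List (List Int)), scope.length ≤ times.length → ∀ answer : Int,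
    (List.range scope.length).foldl (fun ans idx => g (scope.getD idx []) (times.getD idx []) ans) answer
    = (scope.zip times).foldl (fun ans p => g p.1 p.2 ans) answer := by
  intro scope
  induction scope with
  | nil => intro times _ answer; rfl
  | cons sc scope' ih =>
    intro times hlen answer
    cases times with
    | nil => simp at hlen
    | cons tm times' =>
      rw [List.length_cons, List.range_succ_eq_map, List.foldl_cons, List.foldl_map]
      simp only [List.getD_cons_zero, List.getD_cons_succ, List.zip_cons_cons, List.foldl_cons]
      exact ih times' (by simpa using hlen) (g sc tm answer)

-- ===== VERDICT (by name: the statement is the Claim_ definition above) =====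
theorem solution_spec : Claim_equal_solution := by
  intro distance scope times hDom hPre
  clear hDom
  obtain ⟨hlen, hzip⟩ := hPre
  show solution distance scope times = solution_alt distance scope times
  rw [solution, solution_alt,
    fold_align (fun sc tm ans =>
      (PySem.List.pyRange ((PySem.List.min? sc (fun x => x)).getD 0)
          (((PySem.List.max? sc (fun x => x)).getD 0) + 1) 1).foldl (fun a i =>
        if 0 < PySem.Int.mod i tm.sum ∧ PySem.Int.mod i tm.sum ≤ tm.getD 0 0
        then min a i else a) ans) scope times hlen distance]
  revert hzip
  generalize (scope.zip times) = L
  intro hzip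
  induction L generalizing distance with
  | nil => rfl
  | cons p t ih =>
    have hp := hzip p (by simp)
    simp only [List.foldl_cons]
    rw [step_eq _ _ _ _ hp.2]
    exact ih _ (fun q hq => hzip q (List.mem_cons_of_mem p hq))
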